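-- pv_equiv track=rewrite | github.com/mesolitica/malaya | malaya/graph/triplet.py | rebel_format
-- ===== SOURCE A (Python) =====
-- def rebel_format(triplets):
--     """
--     Convert
--     [['Bruno Santana', 'participant of', '2004 Summer Olympics'],
--     ['Bruno Santana', 'participant of', '2008 Summer Olympics'],
--     ['Bruno Santana', 'country of citizenship', 'Brazil']]
--     to rebel format,
--     <triplet> Bruno Santana <subj> 2004 Summer Olympics <obj> participant of <subj> 2008 Summer Olympics <obj> participant of <subj> Brazil <obj> country of citizenship
--     """
--     q = []
--     for no, triple in enumerate(triplets):
--         obj = ['<obj>'] + triple[1].split()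
--         subj = ['<subj>'] + triple[2].split()
--         if no > 0 and triple[0] == triplets[no - 1][0]:
--             q.extend(subj + obj)
--         else:
--             triplet = ['<triplet>'] + triple[0].split()
--             q.extend(triplet + subj + obj)
--     return ' '.join(q)
-- ===== SOURCE B (Python) =====
-- def rebel_format(triplets):
--     # Pass 1: group consecutive triples by identical subject.
--     groups = []
--     for t in triplets:
--         if groups and groups[-1][0] == t[0]:
--             groups[-1][1].append(t)
--         else:
--             groups.append((t[0], [t]))
--     # Pass 2: emit one '<triplet>' header per group, then its members.
--     tokens = []
--     for subj, members in groups: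
--         tokens += ['<triplet>'] + subj.split()
--         for t in members:
--             tokens += ['<subj>'] + t[2].split() + ['<obj>'] + t[1].split()
--     return ' '.join(tokens)
-- ===== Notes on version B (the rewrite author's own statement) =====
-- stated objective: idiomatic
-- what changed: Replaces the single index-based loop that compares triplets[no-1][0] with a two-pass grouping: first build (subject, members) groups of consecutive triples, then emit one header per group followed by its members.
import Mathlib
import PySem

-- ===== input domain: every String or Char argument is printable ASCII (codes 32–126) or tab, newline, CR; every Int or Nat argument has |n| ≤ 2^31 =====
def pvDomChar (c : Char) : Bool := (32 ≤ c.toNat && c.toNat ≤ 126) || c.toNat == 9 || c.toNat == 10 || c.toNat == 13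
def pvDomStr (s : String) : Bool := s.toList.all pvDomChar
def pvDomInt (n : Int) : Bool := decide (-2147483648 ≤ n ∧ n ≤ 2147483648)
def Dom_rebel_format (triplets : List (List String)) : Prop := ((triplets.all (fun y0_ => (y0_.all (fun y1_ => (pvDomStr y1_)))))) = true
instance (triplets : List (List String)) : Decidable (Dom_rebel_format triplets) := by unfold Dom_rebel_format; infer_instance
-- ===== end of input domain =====

-- B replaces A's index-based previous-subject comparison by an explicit two-pass grouping
-- (build consecutive (subject, members) groups, then emit them); same cost, more idiomatic.

-- ===== PORT A =====
-- A's 'for no, triple in enumerate(triplets)' loop, carried as structural recursion over the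
-- same state (no, q); triple[i] and triplets[no-1] via pyGet? (the getD defaults are
-- unreachable under Pre_rebel_format, which excludes the IndexError inputs).
def rebelA_loop (triplets : List (List String)) : Nat → List String → List (List String) → List String
  | _, q, [] => q
  | no, q, triple :: rest =>
    let obj := "<obj>" :: PySem.Str.split₀ ((PySem.List.pyGet? triple 1).getD "")
    let subj := "<subj>" :: PySem.Str.split₀ ((PySem.List.pyGet? triple 2).getD "")
    let q' :=
      if 0 < no ∧ (PySem.List.pyGet? triple 0).getD "" =
          (PySem.List.pyGet? ((PySem.List.pyGet? triplets ((no : Int) - 1)).getD []) 0).getD "" then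
        q ++ (subj ++ obj)
      else
        q ++ (("<triplet>" :: PySem.Str.split₀ ((PySem.List.pyGet? triple 0).getD "")) ++ subj ++ obj)
    rebelA_loop triplets (no + 1) q' rest

def rebel_format (triplets : List (List String)) : String :=
  PySem.Str.join " " (rebelA_loop triplets 0 [] triplets)

-- ===== PORT B =====
def subjOf (t : List String) : String := (PySem.List.pyGet? t 0).getD ""

-- pass 1 of Source B: group consecutive triples with the same subject
def rebelB_groups : List (List String) → List (String × List (List String))
  | [] => []
  | t :: rest =>
    (subjOf t, t :: rest.takeWhile (fun u => subjOf u == subjOf t)) ::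
      rebelB_groups (rest.dropWhile (fun u => subjOf u == subjOf t))
termination_by ts => ts.length
decreasing_by
  simp only [List.length_cons]
  exact Nat.lt_succ_of_le (List.length_dropWhile_le _ _)

-- pass 2 of Source B: the two nested 'tokens +=' loops
def rebel_format_alt (triplets : List (List String)) : String :=
  PySem.Str.join " "
    ((rebelB_groups triplets).foldl
      (fun acc g =>
        (acc ++ ("<triplet>" :: PySem.Str.split₀ g.1)) ++
          g.2.foldl
            (fun a t =>
              a ++ (("<subj>" :: PySem.Str.split₀ ((PySem.List.pyGet? t 2).getD "")) ++
                    ("<obj>" :: PySem.Str.split₀ ((PySem.List.pyGet? t 1).getD ""))))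
            [])
      [])

-- ===== PRECONDITION & SPEC =====
-- Pre_ excludes exactly the inputs on which A raises IndexError: a triple with fewer than 3 fields.
def Pre_rebel_format (triplets : List (List String)) : Prop :=
  ∀ t ∈ triplets, 3 ≤ t.length
instance (triplets : List (List String)) : Decidable (Pre_rebel_format triplets) := by
  unfold Pre_rebel_format; infer_instance

def pvWitness_rebel_format : List (List String) :=
  [["Bruno Santana", "participant of", "2004 Summer Olympics"],
   ["Bruno Santana", "country of citizenship", "Brazil"]]

def Spec_rebel_format (triplets : List (List String)) (out : String) : Prop := out = rebel_format_alt triplets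
instance (triplets : List (List String)) (out : String) : Decidable (Spec_rebel_format triplets out) := by unfold Spec_rebel_format; infer_instance

-- ===== CLAIM (what is proved, stated in full; the proofs are below) =====
def Claim_equal_rebel_format : Prop := ∀ (triplets : List (List String)), Dom_rebel_format triplets → Pre_rebel_format triplets → Spec_rebel_format triplets (rebel_format triplets)

-- ===== LEMMAS AND PROOFS =====

-- token block emitted for one triple's relation/object
def soTok (t : List String) : List String :=
  ("<subj>" :: PySem.Str.split₀ ((PySem.List.pyGet? t 2).getD "")) ++
  ("<obj>" :: PySem.Str.split₀ ((PySem.List.pyGet? t 1).getD ""))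

def hdTok (s : String) : List String := "<triplet>" :: PySem.Str.split₀ s

-- A's loop as a pure token stream keyed on the previous subject
def aTok : Option String → List (List String) → List String
  | _, [] => []
  | prev, t :: rest =>
    (if some (subjOf t) = prev then soTok t else hdTok (subjOf t) ++ soTok t) ++
      aTok (some (subjOf t)) rest

theorem aTok_fresh (prev : Option String) (ts : List (List String))
    (h : ∀ u, ts.head? = some u → some (subjOf u) ≠ prev) :
    aTok prev ts = aTok none ts := by
  cases ts with
  | nil => rfl
  | cons t rest =>
    simp only [aTok]
    rw [if_neg (h t rfl), if_neg (by simp)]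

theorem rebelA_loop_eq_aTok (xs : List (List String)) :
    ∀ (pre suf : List (List String)) (q : List String), xs = pre ++ suf →
      rebelA_loop xs pre.length q suf =
        q ++ aTok (pre.getLast?.map subjOf) suf := by
  intro pre suf
  induction suf generalizing pre with
  | nil => intro q _; simp [rebelA_loop, aTok]
  | cons t rest ih =>
    intro q hx
    simp only [rebelA_loop]
    by_cases hpos : 0 < pre.length
    · have hne : pre ≠ [] := by
        intro h; rw [h] at hpos; simp at hpos
      have hprev : (PySem.List.pyGet? xs ((pre.length : Int) - 1)).getD [] = pre.getLast hne := by
        subst hx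
        rw [show ((pre.length : Int) - 1) = ((pre.length - 1 : Nat) : Int) by omega,
          PySem.List.pyGet?_natCast, List.getElem?_append_left (by omega),
          List.getElem?_eq_getElem (by omega : pre.length - 1 < pre.length)]
        simp [List.getLast_eq_getElem hne]
      by_cases hc : subjOf t = subjOf (pre.getLast hne)
      · rw [if_pos ⟨hpos, by rw [hprev]; exact hc⟩,
          show pre.length + 1 = (pre ++ [t]).length by simp,
          ih (pre ++ [t]) _ (by simpa using hx)]
        simp only [aTok, List.getLast?_concat, Option.map_some,
          List.getLast?_eq_some_getLast hne]
        simp [soTok, List.append_assoc, hc]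
      · rw [if_neg (by
            rintro ⟨_, h2⟩
            rw [hprev] at h2
            exact hc h2),
          show pre.length + 1 = (pre ++ [t]).length by simp,
          ih (pre ++ [t]) _ (by simpa using hx)]
        simp only [aTok, List.getLast?_concat, Option.map_some,
          List.getLast?_eq_some_getLast hne]
        rw [if_neg (by simpa using hc)]
        simp [soTok, hdTok, subjOf, List.append_assoc]
    · have hpre : pre = [] := List.length_eq_zero_iff.mp (by omega)
      subst hpre
      rw [if_neg (by rintro ⟨h, _⟩; simp at h)]
      rw [show ([] : List (List String)).length + 1 = ([t] : List (List String)).length from rfl,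
        ih [t] _ (by simpa using hx)]
      simp [aTok, soTok, hdTok, subjOf, List.append_assoc]

-- B's token list, flattened
def bTok (gs : List (String × List (List String))) : List String :=
  gs.flatMap (fun g => hdTok g.1 ++ g.2.flatMap soTok)

theorem aTok_run (s : String) (mem rest : List (List String))
    (hmem : ∀ u ∈ mem, subjOf u = s)
    (hrest : ∀ u, rest.head? = some u → subjOf u ≠ s) :
    aTok (some s) (mem ++ rest) = mem.flatMap soTok ++ aTok none rest := by
  induction mem with
  | nil =>
    simp only [List.nil_append, List.flatMap_nil, List.nil_append]
    exact aTok_fresh _ _ (fun u hu => by simpa using hrest u hu)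
  | cons m ms ih =>
    simp only [List.cons_append, aTok, List.flatMap_cons]
    rw [if_pos (by rw [hmem m (by simp)]), hmem m (by simp),
      ih (fun u hu => hmem u (by simp [hu]))]
    simp [List.append_assoc]

theorem aTok_eq_bTok (ts : List (List String)) :
    aTok none ts = bTok (rebelB_groups ts) := by
  induction ts using rebelB_groups.induct with
  | case1 => simp [aTok, rebelB_groups, bTok]
  | case2 t rest ih =>
    simp only [rebelB_groups]
    have hsplit : rest = rest.takeWhile (fun u => subjOf u == subjOf t) ++
        rest.dropWhile (fun u => subjOf u == subjOf t) :=
      (List.takeWhile_append_dropWhile).symm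
    simp only [aTok, if_neg (by simp : ¬ some (subjOf t) = none)]
    conv_lhs => rw [hsplit]
    rw [aTok_run (subjOf t) _ _
      (fun u hu => by simpa using List.mem_takeWhile_imp hu)
      (fun u hu => by
        have hh := List.head?_dropWhile_not (fun u => subjOf u == subjOf t) rest
        rw [hu] at hh
        simpa using hh)]
    rw [ih]
    simp [bTok, hdTok, soTok, List.append_assoc]

theorem emit_eq (gs : List (String × List (List String))) (acc : List String) :
    gs.foldl
      (fun acc g =>
        (acc ++ ("<triplet>" :: PySem.Str.split₀ g.1)) ++
          g.2.foldl
            (fun a t =>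
              a ++ (("<subj>" :: PySem.Str.split₀ ((PySem.List.pyGet? t 2).getD "")) ++
                    ("<obj>" :: PySem.Str.split₀ ((PySem.List.pyGet? t 1).getD ""))))
            [])
      acc = acc ++ bTok gs := by
  induction gs generalizing acc with
  | nil => simp [bTok]
  | cons g gs ih =>
    rw [List.foldl_cons, ih, PySem.List.foldl_append_eq_flatMap
      (g := fun t => ("<subj>" :: PySem.Str.split₀ ((PySem.List.pyGet? t 2).getD "")) ++
                     ("<obj>" :: PySem.Str.split₀ ((PySem.List.pyGet? t 1).getD ""))),
      show (fun t => ("<subj>" :: PySem.Str.split₀ ((PySem.List.pyGet? t 2).getD "")) ++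
                     ("<obj>" :: PySem.Str.split₀ ((PySem.List.pyGet? t 1).getD ""))) = soTok from rfl]
    simp [bTok, hdTok, List.append_assoc]

-- ===== VERDICT (by name: the statement is the Claim_ definition above) =====
theorem rebel_format_spec : Claim_equal_rebel_format := by
  intro ts _ _
  unfold Spec_rebel_format rebel_format rebel_format_alt
  rw [emit_eq, ← aTok_eq_bTok]
  have h := rebelA_loop_eq_aTok ts [] ts [] rfl
  simp only [List.length_nil, List.getLast?_nil, Option.map_none, List.nil_append] at h
  rw [h, List.nil_append]
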